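-- pv_equiv track=rewrite | github.com/neodymium6/rust_reveri | tmp.py | get_need_l
-- ===== SOURCE A (Python) =====
-- def get_need_l(i, j):
--     put = 1 << (7 - j)
--     state8 = i << 1
--     if state8 & put:
--         # puting already put position
--         # not happen in game
--         return 0
--     if state8 & (put << 1) == 0:
--         # no opposite stone in left
--         return 0
--     put <<= 1
--     while state8 & put:
--         put <<= 1
--     return put
-- ===== SOURCE B (Python) =====
-- def get_need_l(i, j):
--     put = 1 << (7 - j)
--     state8 = i << 1
--     if state8 & put:
--         # placing on an occupied square
--         return 0
--     if state8 & (put << 1) == 0: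
--         # no opposite stone immediately left
--         return 0
--     # closed form: lowest clear bit of state8 at or above bit position 8 - j.
--     # Fill all bits below that position with ones, add 1 to carry through the
--     # run of trailing ones, and isolate the lowest set bit of the sum.
--     y = (state8 | ((put << 1) - 1)) + 1
--     return y - (y & (y - 1))
-- ===== Notes on version B (the rewrite author's own statement) =====
-- stated objective: alternative
-- what changed: Replaces A's bit-scanning while loop with a closed-form carry trick: OR ones into all bits below the start position, add 1 to ripple through the run of set bits, and isolate the lowest set bit via y - (y & (y-1)).
-- outside the precondition, e.g. on get_need_l(-1, 0): A returns 0, B returns 0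
import Mathlib
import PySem

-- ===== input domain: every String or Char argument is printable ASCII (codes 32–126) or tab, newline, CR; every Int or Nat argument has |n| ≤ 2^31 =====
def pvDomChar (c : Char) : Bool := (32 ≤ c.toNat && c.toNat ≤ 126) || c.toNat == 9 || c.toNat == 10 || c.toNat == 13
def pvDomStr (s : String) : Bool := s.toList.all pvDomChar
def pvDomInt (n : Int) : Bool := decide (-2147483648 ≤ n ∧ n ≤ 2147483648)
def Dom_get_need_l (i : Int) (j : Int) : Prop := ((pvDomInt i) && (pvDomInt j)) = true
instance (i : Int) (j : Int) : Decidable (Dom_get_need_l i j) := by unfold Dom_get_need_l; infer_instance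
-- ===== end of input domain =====

-- B replaces A's bit-scanning while loop by a closed-form carry/lowest-set-bit computation (objective: alternative; same guards, no loop).

-- ===== PORT A =====
-- the 'while state8 & put: put <<= 1' loop of A.  The extra conjuncts '0 < put ∧ put ≤ state8'
-- only make the recursion total: on every state the port reaches inside Pre_ (state8 ≥ 0 and
-- put a power of two) they are implied by 'state8 & put ≠ 0' (lemmas pv_land_pow, pv_testBit_le below).
def needLoop (state8 : Int) (put : Int) : Int :=
  if _h : Int.land state8 put ≠ 0 ∧ 0 < put ∧ put ≤ state8 then
    needLoop state8 (put <<< (1 : Nat))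
  else put
termination_by (state8 + 1 - put).toNat
decreasing_by
  have h2 : put <<< (1 : Nat) = 2 * put := by rw [Int.shiftLeft_eq]; ring
  rw [h2]; omega

def get_need_l (i : Int) (j : Int) : Int :=
  let put := (1 : Int) <<< (7 - j).toNat    -- Python: put = 1 << (7 - j); raises for j > 7 (excluded by Pre_)
  let state8 := i <<< (1 : Nat)             -- Python: state8 = i << 1
  if Int.land state8 put ≠ 0 then 0         -- Python truthiness of state8 & put
  else if Int.land state8 (put <<< (1 : Nat)) = 0 then 0
  else needLoop state8 (put <<< (1 : Nat))  -- Python: put <<= 1; while state8 & put: put <<= 1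

-- ===== PORT B =====
def get_need_l_alt (i : Int) (j : Int) : Int :=
  let put := (1 : Int) <<< (7 - j).toNat
  let state8 := i <<< (1 : Nat)
  if Int.land state8 put ≠ 0 then 0
  else if Int.land state8 (put <<< (1 : Nat)) = 0 then 0
  else
    let y := Int.lor state8 ((put <<< (1 : Nat)) - 1) + 1   -- y = (state8 | ((put << 1) - 1)) + 1
    y - Int.land y (y - 1)                                  -- y - (y & (y - 1))

-- ===== PRECONDITION & SPEC =====
-- Pre_ restricts to the function's natural domain of nonnegative 8-bit-style row states:
-- for j > 7 Python's '1 << (7 - j)' raises ValueError (negative shift count), and for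
-- negative i A's while loop can run forever (e.g. get_need_l(-1, 7)); on the negative i
-- where A's guards do fire and it returns 0, B returns 0 as well.
def Pre_get_need_l (i : Int) (j : Int) : Prop := 0 ≤ i ∧ j ≤ 7
instance (i : Int) (j : Int) : Decidable (Pre_get_need_l i j) := by
  unfold Pre_get_need_l; infer_instance

def pvWitness_get_need_l : Int × Int := (5, 7)

def Spec_get_need_l (i : Int) (j : Int) (out : Int) : Prop := out = get_need_l_alt i j
instance (i : Int) (j : Int) (out : Int) : Decidable (Spec_get_need_l i j out) := by
  unfold Spec_get_need_l; infer_instance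

-- ===== CLAIM (what is proved, stated in full; the proofs are below) =====
def Claim_equal_get_need_l : Prop :=
  ∀ (i : Int) (j : Int), Dom_get_need_l i j → Pre_get_need_l i j →
    Spec_get_need_l i j (get_need_l i j)

-- ===== LEMMAS AND PROOFS =====

-- shifting by the Nat literal 1 is doubling
theorem pv_shl_one (a : Int) : a <<< (1 : Nat) = 2 * a := by
  rw [Int.shiftLeft_eq]; ring

theorem pv_shl_pow (e : Int) :
    (1 : Int) <<< e.toNat = ((2 ^ e.toNat : Nat) : Int) := by
  rw [Int.shiftLeft_eq]; push_cast; ring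

theorem pv_land_cast (m n : Nat) : Int.land (m : Int) (n : Int) = ((m &&& n : Nat) : Int) := by
  simp [Int.land]

theorem pv_lor_cast (m n : Nat) : Int.lor (m : Int) (n : Int) = ((m ||| n : Nat) : Int) := by
  simp [Int.lor]

-- bit k set implies 2^k ≤ n
theorem pv_testBit_le {n k : Nat} (h : n.testBit k = true) : 2 ^ k ≤ n := by
  by_contra hlt
  rw [Nat.testBit_lt_two_pow (by omega)] at h
  exact Bool.false_ne_true h

theorem pv_land_pow {n k : Nat} : n &&& 2 ^ k = (n.testBit k).toNat * 2 ^ k := by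
  simpa using Nat.and_two_pow n k

-- Nat-level copy of needLoop, used only by the proofs
def needLoopN (n : Nat) (q : Nat) : Nat :=
  if n &&& q ≠ 0 ∧ 0 < q ∧ q ≤ n then needLoopN n (2 * q) else q
termination_by n + 1 - q

theorem pv_needLoop_cast (n : Nat) : ∀ q : Nat, needLoop (n : Int) (q : Int) = ((needLoopN n q : Nat) : Int) := by
  intro q
  induction q using needLoopN.induct n with
  | case1 q hg ih =>
    rw [needLoop, needLoopN]
    obtain ⟨h1, h2, h3⟩ := hg
    have hg' : Int.land (n : Int) (q : Int) ≠ 0 ∧ 0 < (q : Int) ∧ (q : Int) ≤ (n : Int) := by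
      rw [pv_land_cast]
      refine ⟨?_, by exact_mod_cast h2, by exact_mod_cast h3⟩
      exact_mod_cast h1
    rw [dif_pos hg', if_pos ⟨h1, h2, h3⟩, pv_shl_one, show (2 : Int) * (q : Int) = ((2 * q : Nat) : Int) by push_cast; ring]
    exact ih
  | case2 q hg =>
    rw [needLoop, needLoopN]
    have hg' : ¬ (Int.land (n : Int) (q : Int) ≠ 0 ∧ 0 < (q : Int) ∧ (q : Int) ≤ (n : Int)) := by
      rw [pv_land_cast]
      intro ⟨h1, h2, h3⟩
      exact hg ⟨by exact_mod_cast h1, by exact_mod_cast h2, by exact_mod_cast h3⟩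
    rw [dif_neg hg', if_neg hg]

-- if bit k of n is set, ORing in the bits below k or the bits below k+1 is the same
theorem pv_lor_step {n k : Nat} (h : n.testBit k = true) :
    n ||| (2 ^ k - 1) = n ||| (2 ^ (k + 1) - 1) := by
  apply Nat.eq_of_testBit_eq
  intro i
  simp only [Nat.testBit_lor, Nat.testBit_two_pow_sub_one]
  by_cases hik : i = k
  · subst hik; simp [h]
  · rw [show decide (i < k) = decide (i < k + 1) from by
      rw [decide_eq_decide]; omega]

-- the crux: if bit k of n is clear, the carry trick isolates 2^k
theorem pv_crux {n k : Nat} (h : n.testBit k = false) :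
    ((n ||| (2 ^ k - 1)) + 1) - (((n ||| (2 ^ k - 1)) + 1) &&& ((n ||| (2 ^ k - 1)) + 1 - 1)) = 2 ^ k := by
  set a := n / 2 ^ (k + 1) with ha
  have hk1 : (0:Nat) < 2 ^ k := Nat.pow_pos (show 0 < 2 by omega)
  have hb : 2 ^ k - 1 < 2 ^ (k + 1) := by
    have : (2:Nat) ^ k ≤ 2 ^ (k+1) := Nat.pow_le_pow_right (by omega) (by omega)
    omega
  have hb2 : 2 ^ k < 2 ^ (k + 1) := Nat.pow_lt_pow_right (by omega) (by omega)
  -- step 1 : n ||| (2^k - 1) = 2^(k+1) * a + (2^k - 1)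
  have hstep1 : n ||| (2 ^ k - 1) = 2 ^ (k + 1) * a + (2 ^ k - 1) := by
    apply Nat.eq_of_testBit_eq
    intro i
    rw [Nat.testBit_lor, Nat.testBit_two_pow_sub_one,
      Nat.testBit_two_pow_mul_add a hb i]
    by_cases hik : i < k
    · rw [if_pos (show i < k + 1 by omega), Nat.testBit_two_pow_sub_one]
      simp [decide_eq_true hik]
    · by_cases hik2 : i = k
      · rw [if_pos (show i < k + 1 by omega), Nat.testBit_two_pow_sub_one, hik2]
        simp [h]
      · rw [if_neg (show ¬ i < k + 1 by omega), ha, ← Nat.shiftRight_eq_div_pow,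
          Nat.testBit_shiftRight, show k + 1 + (i - (k + 1)) = i by omega]
        simp [decide_eq_false (show ¬ i < k by omega)]
    -- step 2 : therefore y = 2^(k+1) * a + 2^k and y - 1 = 2^(k+1) * a + (2^k - 1)
  have hy : (n ||| (2 ^ k - 1)) + 1 = 2 ^ (k + 1) * a + 2 ^ k := by omega
  -- step 4 : y &&& (y - 1) = 2^(k+1) * a
  have hand : (2 ^ (k + 1) * a + 2 ^ k) &&& (2 ^ (k + 1) * a + 2 ^ k - 1) = 2 ^ (k + 1) * a := by
    have hy1 : 2 ^ (k + 1) * a + 2 ^ k - 1 = 2 ^ (k + 1) * a + (2 ^ k - 1) := by omega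
    rw [hy1]
    apply Nat.eq_of_testBit_eq
    intro i
    rw [Nat.testBit_land, Nat.testBit_two_pow_mul_add a hb2 i,
      Nat.testBit_two_pow_mul_add a hb i,
      show 2 ^ (k + 1) * a = a * 2 ^ (k + 1) by ring, Nat.testBit_mul_two_pow]
    by_cases hik : i < k + 1
    · rw [if_pos hik, if_pos hik, Nat.testBit_two_pow, Nat.testBit_two_pow_sub_one]
      by_cases hik2 : i = k
      · rw [hik2]
        simp
      · simp [decide_eq_false (show ¬ k = i by omega),
          decide_eq_false (show ¬ k < i by omega)]
    · rw [if_neg hik, if_neg hik]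
      simp [decide_eq_true (show k < i by omega)]
  rw [hy, hand]
  omega
-- main loop characterisation on Nat: the loop started at 2^k computes the carry trick
theorem pv_main (n : Nat) : ∀ m k : Nat, n + 1 - 2 ^ k ≤ m →
    needLoopN n (2 ^ k) =
      ((n ||| (2 ^ k - 1)) + 1) - (((n ||| (2 ^ k - 1)) + 1) &&& ((n ||| (2 ^ k - 1)) + 1 - 1)) := by
  intro m
  induction m with
  | zero =>
    intro k hm
    have hn : n < 2 ^ k := by omega
    have hb : n.testBit k = false := Nat.testBit_lt_two_pow hn
    have hz : n &&& 2 ^ k = 0 := by rw [pv_land_pow, hb]; simp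
    rw [needLoopN, if_neg (by simp [hz])]
    exact (pv_crux hb).symm
  | succ m ih =>
    intro k hm
    by_cases hb : n.testBit k = true
    · have hle : 2 ^ k ≤ n := pv_testBit_le hb
      have hz : n &&& 2 ^ k ≠ 0 := by
        rw [pv_land_pow, hb]
        have := Nat.pow_pos (show 0 < 2 by omega) (n := k)
        simp
      rw [needLoopN, if_pos ⟨hz, Nat.pow_pos (show 0 < 2 by omega), hle⟩,
        show 2 * 2 ^ k = 2 ^ (k + 1) by ring, pv_lor_step hb]
      apply ih
      have : (2:Nat) ^ k < 2 ^ (k + 1) := Nat.pow_lt_pow_right (by omega) (by omega)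
      omega
    · have hbf : n.testBit k = false := by simpa using hb
      have hz : n &&& 2 ^ k = 0 := by rw [pv_land_pow, hbf]; simp
      rw [needLoopN, if_neg (by simp [hz])]
      exact (pv_crux hbf).symm

-- ===== VERDICT (by name: the statement is the Claim_ definition above) =====
theorem get_need_l_spec : Claim_equal_get_need_l := by
  intro i j _ hpre
  obtain ⟨hi, hj⟩ := hpre
  unfold Spec_get_need_l get_need_l get_need_l_alt
  dsimp only
  set p : Nat := (7 - j).toNat with hp
  have hput : (1 : Int) <<< (7 - j).toNat = ((2 ^ p : Nat) : Int) := pv_shl_pow _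
  set N : Nat := (2 * i).toNat with hN
  have hstate : i <<< (1 : Nat) = ((N : Nat) : Int) := by
    rw [pv_shl_one]; omega
  rw [hput, hstate, pv_shl_one, show (2:Int) * ((2 ^ p : Nat) : Int) = ((2 ^ (p + 1) : Nat) : Int) by push_cast; ring]
  rw [pv_land_cast]
  by_cases h1 : ((N &&& 2 ^ p : Nat) : Int) ≠ 0
  · simp only [if_pos h1]
  · simp only [if_neg h1]
    rw [pv_land_cast]
    by_cases h2 : ((N &&& 2 ^ (p + 1) : Nat) : Int) = 0
    · simp only [if_pos h2]
    · simp only [if_neg h2]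
      have hpow : ((2 ^ (p + 1) : Nat) : Int) - 1 = ((2 ^ (p + 1) - 1 : Nat) : Int) := by
        have := Nat.pow_pos (show 0 < 2 by omega) (n := p + 1)
        push_cast [this]; ring
      rw [hpow, pv_lor_cast, pv_needLoop_cast,
        pv_main N (N + 1 - 2 ^ (p + 1)) (p + 1) (le_refl _), Nat.add_sub_cancel,
        show ((N ||| (2 ^ (p + 1) - 1) : Nat) : Int) + 1 - 1
            = ((N ||| (2 ^ (p + 1) - 1) : Nat) : Int) from by ring,
        show ((N ||| (2 ^ (p + 1) - 1) : Nat) : Int) + 1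
            = (((N ||| (2 ^ (p + 1) - 1)) + 1 : Nat) : Int) from by push_cast; ring,
        pv_land_cast]
      have hle : ((N ||| (2 ^ (p + 1) - 1)) + 1) &&& (N ||| (2 ^ (p + 1) - 1)) ≤
          (N ||| (2 ^ (p + 1) - 1)) + 1 := Nat.and_le_left
      omega
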